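-- pv_equiv track=rewrite | github.com/imcbee/codewars_practice | codewars_problems.py | remove_every_other
-- ===== SOURCE A (Python) =====
-- def remove_every_other(my_list):
--     keep = []
--     dont_keep = []
--
--     for idx, word in enumerate(my_list):
--         if idx % 2 ==0:
--             keep.append(word)
--         else:
--             dont_keep.append(word)
--
--     return keep
-- ===== SOURCE B (Python) =====
-- def remove_every_other(my_list):
--     kept = []
--     for i in range(0, len(my_list), 2):
--         kept.append(my_list[i])
--     return kept
-- ===== Notes on version B (the rewrite author's own statement) =====
-- stated objective: simpler
-- what changed: Replaces the enumerate loop with a parity test and two accumulator lists by a single strided index loop range(0, len, 2) that visits only the even positions and keeps one list.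
import Mathlib
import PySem

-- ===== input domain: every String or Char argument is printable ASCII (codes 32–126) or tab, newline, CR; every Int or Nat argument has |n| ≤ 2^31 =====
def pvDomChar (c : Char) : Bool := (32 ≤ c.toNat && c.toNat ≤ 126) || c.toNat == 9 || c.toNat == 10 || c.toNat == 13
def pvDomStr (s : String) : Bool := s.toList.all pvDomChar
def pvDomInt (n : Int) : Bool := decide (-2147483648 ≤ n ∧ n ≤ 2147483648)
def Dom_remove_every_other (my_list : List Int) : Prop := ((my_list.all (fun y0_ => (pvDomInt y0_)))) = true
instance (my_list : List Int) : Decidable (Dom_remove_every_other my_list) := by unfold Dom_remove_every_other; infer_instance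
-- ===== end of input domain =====

-- B replaces A's enumerate loop, parity branch and two accumulator lists by a single
-- strided index loop over range(0, len, 2) keeping one list: simpler, same cost.


-- ===== PORT A =====
-- loop body: if idx % 2 == 0: keep.append(word) else: dont_keep.append(word)
def removeStepA (acc : List Int × List Int) (p : Int × Int) : List Int × List Int :=
  if PySem.Int.mod p.1 2 = 0 then (acc.1 ++ [p.2], acc.2) else (acc.1, acc.2 ++ [p.2])

-- for idx, word in enumerate(my_list): … ; return keep
def remove_every_other (my_list : List Int) : List Int :=
  (List.foldl removeStepA ([], []) (PySem.List.enumerate my_list 0)).1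

-- ===== PORT B =====
-- kept = []; for i in range(0, len(my_list), 2): kept.append(my_list[i]); return kept
-- (my_list[i] is ported as pyGetD with default 0: i is always in range here)
def remove_every_other_alt (my_list : List Int) : List Int :=
  (PySem.List.pyRange 0 (my_list.length : Int) 2).foldl
    (fun kept i => kept ++ [PySem.List.pyGetD my_list i 0]) []

-- ===== PRECONDITION & SPEC =====
def Spec_remove_every_other (my_list : List Int) (out : List Int) : Prop := out = remove_every_other_alt my_list
instance (my_list : List Int) (out : List Int) : Decidable (Spec_remove_every_other my_list out) := by unfold Spec_remove_every_other; infer_instance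

-- ===== CLAIM (what is proved, stated in full; the proofs are below) =====
def Claim_equal_remove_every_other : Prop := ∀ (my_list : List Int), Dom_remove_every_other my_list → Spec_remove_every_other my_list (remove_every_other my_list)

-- ===== LEMMAS AND PROOFS =====

-- proof-only reference function: the even-indexed elements
def evens : List Int → List Int
  | [] => []
  | [x] => [x]
  | x :: _ :: rest => x :: evens rest

lemma evens_cons (x : Int) (rest : List Int) :
    evens (x :: rest) = x :: evens rest.tail := by
  cases rest <;> simp [evens]

lemma pymod_two (t : Int) : PySem.Int.mod t 2 = t % 2 :=
  PySem.Int.mod_eq_emod_of_pos (by norm_num)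

lemma loopA (xs : List Int) (s : Int) (k d : List Int) :
    (List.foldl removeStepA (k, d) (PySem.List.enumerate xs s)).1
    = k ++ (if PySem.Int.mod s 2 = 0 then evens xs else evens xs.tail) := by
  induction xs generalizing s k d with
  | nil => simp [PySem.List.enumerate_nil, evens]
  | cons x rest ih =>
    rw [PySem.List.enumerate_cons, List.foldl_cons]
    by_cases hs : PySem.Int.mod s 2 = 0
    · have hs1 : ¬ PySem.Int.mod (s + 1) 2 = 0 := by
        rw [pymod_two] at hs ⊢; omega
      have hstep : removeStepA (k, d) (s, x) = (k ++ [x], d) := by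
        unfold removeStepA
        rw [if_pos (show PySem.Int.mod (s, x).1 2 = 0 from hs)]
      rw [hstep, ih (s + 1) (k ++ [x]) d, if_neg hs1, if_pos hs, evens_cons]
      simp
    · have hs1 : PySem.Int.mod (s + 1) 2 = 0 := by
        rw [pymod_two] at hs ⊢; omega
      have hstep : removeStepA (k, d) (s, x) = (k, d ++ [x]) := by
        unfold removeStepA
        rw [if_neg (show ¬ PySem.Int.mod (s, x).1 2 = 0 from hs)]
      rw [hstep, ih (s + 1) k (d ++ [x]), if_pos hs1, if_neg hs]
      simp

lemma pyRange_two_nil (a b : Int) (h : b ≤ a) : PySem.List.pyRange a b 2 = [] := by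
  rw [PySem.List.pyRange_of_pos a b (by norm_num), if_neg (by omega)]
  simp

lemma pyRange_two_cons (a b : Int) (h : a < b) :
    PySem.List.pyRange a b 2 = a :: PySem.List.pyRange (a + 2) b 2 := by
  rw [PySem.List.pyRange_of_pos a b (by norm_num),
      PySem.List.pyRange_of_pos (a + 2) b (by norm_num)]
  have hc : (if a < b then ((b - a + 2 - 1) / 2).toNat else 0)
      = (if a + 2 < b then ((b - (a + 2) + 2 - 1) / 2).toNat else 0) + 1 := by
    split_ifs <;> omega
  rw [hc, List.range_succ_eq_map, List.map_cons, List.map_map]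
  refine congrArg₂ _ (by simp) ?_
  refine List.map_congr_left (fun k _ => ?_)
  simp [Function.comp]
  ring

lemma loopB_aux (m : Nat) : ∀ (xs : List Int) (a : Nat) (k : List Int), xs.length ≤ a + m →
    (PySem.List.pyRange (a : Int) (xs.length : Int) 2).foldl
      (fun kept i => kept ++ [PySem.List.pyGetD xs i 0]) k
    = k ++ evens (xs.drop a) := by
  induction m with
  | zero =>
    intro xs a k h
    rw [pyRange_two_nil _ _ (by exact_mod_cast h), List.foldl_nil,
        List.drop_eq_nil_of_le (by omega)]
    simp [evens]
  | succ m ih =>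
    intro xs a k h
    by_cases hlt : a < xs.length
    · rw [pyRange_two_cons _ _ (by exact_mod_cast hlt), List.foldl_cons]
      have hcast : ((a : Int) + 2) = (((a + 2 : Nat)) : Int) := by push_cast; ring
      rw [hcast, ih xs (a + 2) _ (by omega)]
      have hg : PySem.List.pyGetD xs (a : Int) 0 = xs[a] := by
        rw [PySem.List.pyGetD_natCast, List.getD_eq_getElem _ _ hlt]
      have hd : xs.drop a = xs[a] :: xs.drop (a + 1) := List.drop_eq_getElem_cons hlt
      rw [hd, evens_cons, List.tail_drop, hg]
      simp
    · rw [pyRange_two_nil _ _ (by exact_mod_cast (by omega : xs.length ≤ a)), List.foldl_nil,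
          List.drop_eq_nil_of_le (by omega)]
      simp [evens]

-- ===== VERDICT (by name: the statement is the Claim_ definition above) =====
theorem remove_every_other_spec : Claim_equal_remove_every_other := by
  intro my_list _
  unfold Spec_remove_every_other remove_every_other remove_every_other_alt
  have ha := loopA my_list 0 [] []
  rw [if_pos (by decide)] at ha
  have hb := loopB_aux my_list.length my_list 0 [] (by omega)
  simp only [Nat.cast_zero, List.drop_zero, List.nil_append] at ha hb
  rw [ha, hb]
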